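-- pv_equiv track=rewrite | github.com/fzjawed/Swap-Consecutive-Index-Pairs | Swap-Consecutive-Index.py | solve
-- ===== SOURCE A (Python) =====
-- def solve(nums):
--    length = len(nums)
--    for i in range(0,length,4):
--       if(i+2<length):
--          nums[i], nums[i+2] = nums[i+2], nums[i]
--       if(i+3<length):
--          nums[i+1], nums[i+3] = nums[i+3], nums[i+1]
--    return nums
-- ===== SOURCE B (Python) =====
-- def solve(nums):
--     # Build a new list chunk by chunk (blocks of 4), then write it back in
--     # place (A mutates nums; B preserves that).
--     res = []
--     for i in range(0, len(nums), 4):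
--         chunk = nums[i:i+4]
--         if len(chunk) == 4:
--             res += [chunk[2], chunk[3], chunk[0], chunk[1]]
--         elif len(chunk) == 3:
--             res += chunk[::-1]
--         else:
--             res += chunk
--     nums[:] = res
--     return nums
-- ===== Notes on version B (the rewrite author's own statement) =====
-- stated objective: alternative
-- what changed: Replaces A's in-place paired index swaps over range(0,len,4) with a rebuild: slice each 4-block and append its transform ([a,b,c,d]->[c,d,a,b], a trailing triple reversed, shorter tails unchanged) to a fresh list written back via nums[:]=.
import Mathlib
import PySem

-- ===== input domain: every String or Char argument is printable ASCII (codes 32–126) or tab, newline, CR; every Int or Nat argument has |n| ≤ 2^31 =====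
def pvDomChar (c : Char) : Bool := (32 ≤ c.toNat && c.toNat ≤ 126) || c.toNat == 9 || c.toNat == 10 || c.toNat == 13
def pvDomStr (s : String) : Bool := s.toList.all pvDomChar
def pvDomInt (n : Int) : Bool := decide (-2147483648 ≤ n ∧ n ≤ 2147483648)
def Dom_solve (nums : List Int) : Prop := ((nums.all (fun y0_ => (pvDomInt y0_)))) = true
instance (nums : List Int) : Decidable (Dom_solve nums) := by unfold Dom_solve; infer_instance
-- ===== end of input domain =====

-- B rebuilds the list chunk by chunk (4-blocks, each transformed and appended to a
-- fresh list written back in place) instead of A's in-place paired index swaps;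
-- same values and same in-place mutation, different decomposition.

-- ===== PORT A =====
-- nums[i], nums[j] = nums[j], nums[i]  (both indices in range when used)
def pvSwap (l : List Int) (i j : Nat) : List Int :=
  match l[i]?, l[j]? with
  | some a, some b => (l.set i b).set j a
  | _, _ => l

-- one body of A's for-loop, with n = len(nums) captured before the loop
def pvStepA (n : Int) (l : List Int) (i : Int) : List Int :=
  let l1 := if i + 2 < n then pvSwap l i.toNat (i.toNat + 2) else l
  if i + 3 < n then pvSwap l1 (i.toNat + 1) (i.toNat + 3) else l1

def solve (nums : List Int) : List Int :=
  (PySem.List.pyRange 0 nums.length 4).foldl (pvStepA nums.length) nums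

-- ===== PORT B =====
-- one body of B's for-loop; chunk[k] on the checked-length branches is ported as
-- List.getD (exact there: the index is in range)
def pvStepB (nums : List Int) (res : List Int) (i : Int) : List Int :=
  let chunk := PySem.List.slice nums (some i) (some (i + 4))
  if chunk.length = 4 then
    res ++ [chunk.getD 2 0, chunk.getD 3 0, chunk.getD 0 0, chunk.getD 1 0]
  else if chunk.length = 3 then res ++ chunk.reverse
  else res ++ chunk

def solve_alt (nums : List Int) : List Int :=
  (PySem.List.pyRange 0 nums.length 4).foldl (pvStepB nums) []

-- ===== PRECONDITION & SPEC =====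
def Spec_solve (nums : List Int) (out : List Int) : Prop := out = solve_alt nums
instance (nums : List Int) (out : List Int) : Decidable (Spec_solve nums out) := by unfold Spec_solve; infer_instance

-- ===== CLAIM (what is proved, stated in full; the proofs are below) =====
def Claim_equal_solve : Prop := ∀ (nums : List Int), Dom_solve nums → Spec_solve nums (solve nums)

-- ===== LEMMAS AND PROOFS =====

lemma pvSwap_cons (x : Int) (l : List Int) (i j : Nat) :
    pvSwap (x :: l) (i + 1) (j + 1) = x :: pvSwap l i j := by
  simp only [pvSwap, List.getElem?_cons_succ]
  cases l[i]? <;> cases l[j]? <;> simp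

lemma pvStepA_cons (n : Int) (x : Int) (l : List Int) (i : Int) (hi : 0 ≤ i) :
    pvStepA n (x :: l) (i + 1) = x :: pvStepA (n - 1) l i := by
  have ht : (i + 1).toNat = i.toNat + 1 := by omega
  simp only [pvStepA, ht]
  have e2 : (i + 2 < n - 1) ↔ (i + 1 + 2 < n) := by omega
  have e3 : (i + 3 < n - 1) ↔ (i + 1 + 3 < n) := by omega
  by_cases h2 : i + 1 + 2 < n <;> by_cases h3 : i + 1 + 3 < n <;>
    simp [h2, h3, e2, e3, pvSwap_cons, show i.toNat + 1 + 2 = (i.toNat + 2) + 1 by ring,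
      show i.toNat + 1 + 3 = (i.toNat + 3) + 1 by ring]

lemma foldl_stepA_cons (n : Int) (x : Int) :
    ∀ (r : List Int), (∀ i ∈ r, 0 ≤ i) → ∀ (l : List Int),
    (r.map (· + 1)).foldl (pvStepA n) (x :: l) = x :: r.foldl (pvStepA (n - 1)) l := by
  intro r
  induction r with
  | nil => intro _ l; simp
  | cons i r ih =>
    intro h l
    simp only [List.map_cons, List.foldl_cons]
    rw [pvStepA_cons n x l i (h i (by simp))]
    exact ih (fun j hj => h j (by simp [hj])) _

lemma map_add_four (r : List Int) :
    r.map (· + 4) = (((r.map (· + 1)).map (· + 1)).map (· + 1)).map (· + 1) := by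
  simp only [List.map_map]; apply List.map_congr_left; intro a _; simp; ring

lemma foldl_stepA_cons4 (n a b c d : Int) (r : List Int) (h : ∀ i ∈ r, 0 ≤ i) (l : List Int) :
    (r.map (· + 4)).foldl (pvStepA n) (a :: b :: c :: d :: l)
      = a :: b :: c :: d :: r.foldl (pvStepA (n - 4)) l := by
  have hstep : ∀ (s : List Int), (∀ i ∈ s, 0 ≤ i) → ∀ i ∈ s.map (· + 1), 0 ≤ i := by
    intro s hs i hi; simp only [List.mem_map] at hi
    obtain ⟨j, hj, rfl⟩ := hi; have := hs j hj; omega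
  have h1 := hstep r h
  have h2 := hstep _ h1
  have h3 := hstep _ h2
  rw [map_add_four, foldl_stepA_cons n a _ h3, foldl_stepA_cons (n-1) b _ h2,
      foldl_stepA_cons (n-1-1) c _ h1, foldl_stepA_cons (n-1-1-1) d _ h,
      show n - 1 - 1 - 1 - 1 = n - 4 by ring]

lemma mem_pyRange04_nonneg {i b : Int} (h : i ∈ PySem.List.pyRange 0 b 4) : 0 ≤ i := by
  rw [PySem.List.pyRange_of_pos 0 b (by norm_num)] at h
  simp at h
  obtain ⟨k, _, rfl⟩ := h
  positivity

lemma pyRange04_decomp (b : Int) (hb : 0 < b) :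
    PySem.List.pyRange 0 b 4 = 0 :: (PySem.List.pyRange 0 (b - 4) 4).map (· + 4) := by
  rw [PySem.List.pyRange_of_pos 0 b (by norm_num),
      PySem.List.pyRange_of_pos 0 (b - 4) (by norm_num)]
  simp only [if_pos hb]
  have hcnt : ((b - 0 + 4 - 1) / 4).toNat
      = (if 0 < b - 4 then ((b - 4 - 0 + 4 - 1) / 4).toNat else 0) + 1 := by
    split_ifs <;> omega
  rw [hcnt, List.range_succ_eq_map]
  simp only [List.map_cons, List.map_map]
  congr 1

lemma solve_block4 (a b c d : Int) (rest : List Int) :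
    solve (a :: b :: c :: d :: rest) = c :: d :: a :: b :: solve rest := by
  unfold solve
  have hlen : ((a :: b :: c :: d :: rest).length : Int) = (rest.length : Int) + 4 := by
    simp; omega
  rw [hlen, pyRange04_decomp _ (by omega)]
  simp only [List.foldl_cons]
  have hstep : pvStepA ((rest.length : Int) + 4) (a :: b :: c :: d :: rest) 0
      = c :: d :: a :: b :: rest := by
    simp only [pvStepA]
    rw [if_pos (by omega), if_pos (by omega)]
    rcases rest with _ | ⟨x, t⟩ <;> simp [pvSwap]
  rw [hstep]
  rw [foldl_stepA_cons4 _ c d a b _ (fun i hi => mem_pyRange04_nonneg hi) rest]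
  norm_num

lemma pvStepB_acc (nums acc res : List Int) (i : Int) :
    pvStepB nums (acc ++ res) i = acc ++ pvStepB nums res i := by
  simp only [pvStepB]; split_ifs <;> simp

lemma foldl_pvStepB_acc (nums : List Int) :
    ∀ (r acc res : List Int),
    r.foldl (pvStepB nums) (acc ++ res) = acc ++ r.foldl (pvStepB nums) res := by
  intro r
  induction r with
  | nil => intro acc res; simp
  | cons i r ih =>
    intro acc res
    simp only [List.foldl_cons, pvStepB_acc]
    exact ih acc _

lemma slice_cons_shift (x : Int) (l : List Int) (i : Int) (hi : 0 ≤ i) :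
    PySem.List.slice (x :: l) (some (i + 1)) (some (i + 1 + 4))
      = PySem.List.slice l (some i) (some (i + 4)) := by
  rw [PySem.List.slice_toNat _ (by omega) (by omega),
      PySem.List.slice_toNat _ (by omega) (by omega)]
  rw [show (i + 1).toNat = i.toNat + 1 by omega,
      show (i + 1 + 4).toNat = (i + 4).toNat + 1 by omega]
  simp only [List.drop_succ_cons]
  congr 1
  omega

lemma pvStepB_cons (x : Int) (l res : List Int) (i : Int) (hi : 0 ≤ i) :
    pvStepB (x :: l) res (i + 1) = pvStepB l res i := by
  simp only [pvStepB, slice_cons_shift x l i hi]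

lemma foldl_pvStepB_cons (x : Int) (l : List Int) :
    ∀ (r : List Int), (∀ i ∈ r, 0 ≤ i) → ∀ (res : List Int),
    (r.map (· + 1)).foldl (pvStepB (x :: l)) res = r.foldl (pvStepB l) res := by
  intro r
  induction r with
  | nil => intro _ res; simp
  | cons i r ih =>
    intro h res
    simp only [List.map_cons, List.foldl_cons]
    rw [pvStepB_cons x l res i (h i (by simp))]
    exact ih (fun j hj => h j (by simp [hj])) _

lemma foldl_pvStepB_cons4 (a b c d : Int) (l : List Int) (r : List Int)
    (h : ∀ i ∈ r, 0 ≤ i) (res : List Int) :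
    (r.map (· + 4)).foldl (pvStepB (a :: b :: c :: d :: l)) res
      = r.foldl (pvStepB l) res := by
  have hstep : ∀ (s : List Int), (∀ i ∈ s, 0 ≤ i) → ∀ i ∈ s.map (· + 1), 0 ≤ i := by
    intro s hs i hi; simp only [List.mem_map] at hi
    obtain ⟨j, hj, rfl⟩ := hi; have := hs j hj; omega
  have h1 := hstep r h
  have h2 := hstep _ h1
  have h3 := hstep _ h2
  rw [map_add_four, foldl_pvStepB_cons a _ _ h3, foldl_pvStepB_cons b _ _ h2,
      foldl_pvStepB_cons c _ _ h1, foldl_pvStepB_cons d _ _ h]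

lemma alt_block4 (a b c d : Int) (rest : List Int) :
    solve_alt (a :: b :: c :: d :: rest) = c :: d :: a :: b :: solve_alt rest := by
  unfold solve_alt
  have hlen : ((a :: b :: c :: d :: rest).length : Int) = (rest.length : Int) + 4 := by
    simp; omega
  rw [hlen, pyRange04_decomp _ (by omega)]
  simp only [List.foldl_cons]
  have hstep0 : pvStepB (a :: b :: c :: d :: rest) [] 0 = [c, d, a, b] := by
    simp only [pvStepB]
    rw [PySem.List.slice_toNat _ (by norm_num) (by norm_num)]
    simp
  rw [hstep0, foldl_pvStepB_cons4 a b c d rest _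
        (fun i hi => mem_pyRange04_nonneg hi) [c, d, a, b],
      show (rest.length : Int) + 4 - 4 = (rest.length : Int) by ring,
      show ([c, d, a, b] : List Int) = [c, d, a, b] ++ [] by simp,
      foldl_pvStepB_acc]
  simp

lemma solve_eq_alt (nums : List Int) : solve nums = solve_alt nums := by
  match nums with
  | [] => decide
  | [a] =>
    simp [solve, solve_alt, PySem.List.pyRange, pvStepA, pvStepB, PySem.List.slice]
  | [a, b] =>
    simp [solve, solve_alt, PySem.List.pyRange, pvStepA, pvStepB, PySem.List.slice]
  | [a, b, c] =>
    simp [solve, solve_alt, PySem.List.pyRange, pvStepA, pvSwap, pvStepB, PySem.List.slice]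
  | a :: b :: c :: d :: rest =>
    rw [solve_block4, alt_block4, solve_eq_alt rest]

-- ===== VERDICT (by name: the statement is the Claim_ definition above) =====
theorem solve_spec : Claim_equal_solve := by
  intro nums _
  exact solve_eq_alt nums
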